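-- pv_equiv track=rewrite | github.com/pypi-data/pypi-mirror-400 | packages/ml-workbench/ml_workbench-0.2.0.tar.gz/ml_workbench-0.2.0/ml_workbench/dataset.py | _is_databricks_table_name
-- ===== SOURCE A (Python) =====
-- DELTA_TABLE_PARTS_COUNT = 2  # catalog.schema.table format has 2 dots
--
-- def _is_databricks_table_name(path: str) -> bool:
--     """Return True if ``path`` looks like a Databricks table identifier.
--
--     Heuristic: exactly two dots separating catalog.schema.table and no path separators
--     or URL schemes. This keeps the check permissive and practical.
--     """
--
--     if "/" in path or "\\" in path:
--         return False
--     # Exclude common URL schemes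
--     if "://" in path:
--         return False
--     if path.count(".") != DELTA_TABLE_PARTS_COUNT:
--         return False
--     parts = path.split(".")
--     return all(part.strip() for part in parts)
-- ===== SOURCE B (Python) =====
-- def _is_databricks_table_name(path: str) -> bool:
--     # One-pass DFA over the characters: reject path separators on sight,
--     # count dots, and track whether the current dot-delimited part has a
--     # non-whitespace character; never builds the split list.
--     dots = 0
--     has = False
--     ok = True
--     for ch in path:
--         if ch == "/" or ch == "\\":
--             return False
--         if ch == ".":
--             ok = ok and has
--             dots += 1
--             has = False
--         elif not ch.isspace():
--             has = True
--     return dots == 2 and ok and has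
-- ===== Notes on version B (the rewrite author's own statement) =====
-- stated objective: alternative
-- what changed: Replaces A's staged whole-string scans (two separator membership tests, a scheme test, a dot count, then a split plus an all-parts pass) with a single left-to-right character scan: a small state machine that rejects a separator on sight and maintains a dot counter plus a has-non-whitespace flag per part, never building the split list.
import Mathlib
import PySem

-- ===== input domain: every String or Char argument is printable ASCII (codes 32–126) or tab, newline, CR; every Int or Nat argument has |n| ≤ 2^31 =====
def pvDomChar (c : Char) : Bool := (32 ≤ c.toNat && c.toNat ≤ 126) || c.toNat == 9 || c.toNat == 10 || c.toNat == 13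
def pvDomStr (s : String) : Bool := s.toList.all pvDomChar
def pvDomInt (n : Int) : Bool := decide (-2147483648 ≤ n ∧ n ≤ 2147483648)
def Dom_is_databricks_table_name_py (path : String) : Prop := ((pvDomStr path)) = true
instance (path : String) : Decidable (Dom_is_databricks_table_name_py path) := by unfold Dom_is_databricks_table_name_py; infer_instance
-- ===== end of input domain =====

-- B is a single left-to-right character scan (state machine: dot counter + has-non-whitespace flag
-- per part, separator rejected on sight) instead of A's staged whole-string scans plus a split;
-- same return value on every input.

-- ===== PORT A =====
def is_databricks_table_name_py (path : String) : Bool :=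
  if PySem.Str.isIn "/" path || PySem.Str.isIn "\\" path then false
  else if PySem.Str.isIn "://" path then false
  else if PySem.Str.count path "." != 2 then false
  else ((PySem.Str.split? path ".").getD []).all (fun part => !(PySem.Str.strip part == ""))

-- ===== PORT B =====
-- the for-loop of Source B: state (dots, has, ok); an early 'return False' is the 'false' branch
def altLoop : List Char → Nat → Bool → Bool → Bool
  | [], dots, has, ok => dots == 2 && ok && has
  | c :: rest, dots, has, ok =>
    if c = '/' || c = '\\' then false
    else if c = '.' then altLoop rest (dots + 1) false (ok && has)
    else if PySem.Chars.isspace c then altLoop rest dots has ok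
    else altLoop rest dots true ok

def is_databricks_table_name_py_alt (path : String) : Bool :=
  altLoop path.toList 0 false true

-- ===== PRECONDITION & SPEC =====
def Spec_is_databricks_table_name_py (path : String) (out : Bool) : Prop := out = is_databricks_table_name_py_alt path
instance (path : String) (out : Bool) : Decidable (Spec_is_databricks_table_name_py path out) := by unfold Spec_is_databricks_table_name_py; infer_instance

-- ===== CLAIM (what is proved, stated in full; the proofs are below) =====
def Claim_equal_is_databricks_table_name_py : Prop := ∀ (path : String), Dom_is_databricks_table_name_py path → Spec_is_databricks_table_name_py path (is_databricks_table_name_py path)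

-- ===== LEMMAS AND PROOFS =====

/-- Reference split-on-'.' used only by the proofs. -/
def splitDot : List Char → List (List Char)
  | [] => [[]]
  | c :: rest => if c = '.' then [] :: splitDot rest else (splitDot rest).modifyHead (c :: ·)

/-- A part is blank iff every character is whitespace. -/
def blankPart (p : List Char) : Bool := p.all PySem.Chars.isspace

/-- The parts condition B's scan maintains: `has` is whether the current (first) part already
has a non-whitespace character; every part must end up non-blank. -/
def allNB (has : Bool) : List (List Char) → Bool
  | [] => has
  | p :: ps => if ps.isEmpty then has || !blankPart p
               else (has || !blankPart p) && allNB false ps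

/-- Common normal form both ports are reduced to. -/
def specForm (l : List Char) : Bool :=
  if '/' ∈ l ∨ '\\' ∈ l then false
  else decide (l.count '.' = 2) && (splitDot l).all (fun p => !blankPart p)

theorem splitDot_ne_nil (l : List Char) : splitDot l ≠ [] := by
  cases l with
  | nil => simp [splitDot]
  | cons c rest =>
    simp only [splitDot]
    split_ifs <;> simp [List.modifyHead_eq_nil_iff, splitDot_ne_nil rest]

theorem splitOn_go_dot (fuel : Nat) (l cur : List Char) (accs : List (List Char))
    (hf : l.length ≤ fuel) :
    PySem.Chars.splitOn.go ['.'] fuel l cur accs =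
      accs.reverse ++ (splitDot l).modifyHead (cur.reverse ++ ·) := by
  induction fuel generalizing l cur accs with
  | zero =>
    have : l = [] := List.length_eq_zero_iff.mp (Nat.le_zero.mp hf)
    subst this
    simp [PySem.Chars.splitOn.go, splitDot]
  | succ fuel ih =>
    cases l with
    | nil => simp [PySem.Chars.splitOn.go, splitDot]
    | cons c rest =>
      simp only [PySem.Chars.splitOn.go]
      by_cases h : c = '.'
      · subst h
        rw [if_pos (by simp [List.isPrefixOf])]
        simp only [List.length_cons, List.drop_succ_cons, List.length_nil, List.drop_zero]
        rw [ih rest [] (cur.reverse :: accs) (by simpa using Nat.le_of_succ_le_succ hf)]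
        cases hsd : splitDot rest <;> simp [splitDot, hsd]
      · rw [if_neg (by simp [List.isPrefixOf, Ne.symm h])]
        rw [ih rest (c :: cur) _ (by simpa using Nat.le_of_succ_le_succ hf)]
        cases hsd : splitDot rest with
        | nil => exact absurd hsd (splitDot_ne_nil rest)
        | cons q qs => simp [splitDot, h, hsd]

theorem splitOn_dot (l : List Char) : PySem.Chars.splitOn l ['.'] = splitDot l := by
  unfold PySem.Chars.splitOn
  rw [splitOn_go_dot (l.length + 1) l [] [] (Nat.le_succ _)]
  cases splitDot l <;> simp

theorem count_go_dot (fuel : Nat) (l : List Char) (acc : Nat) (hf : l.length ≤ fuel) :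
    PySem.Chars.count.go ['.'] fuel l acc = acc + l.count '.' := by
  induction fuel generalizing l acc with
  | zero =>
    have : l = [] := List.length_eq_zero_iff.mp (Nat.le_zero.mp hf)
    subst this; simp [PySem.Chars.count.go]
  | succ fuel ih =>
    cases l with
    | nil => simp [PySem.Chars.count.go]
    | cons c rest =>
      simp only [PySem.Chars.count.go]
      by_cases h : c = '.'
      · subst h
        rw [if_pos (by simp [List.isPrefixOf])]
        simp only [List.length_cons, List.drop_succ_cons, List.length_nil, List.drop_zero]
        rw [ih rest (acc + 1) (by simpa using Nat.le_of_succ_le_succ hf)]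
        simp; omega
      · rw [if_neg (by simp [List.isPrefixOf, Ne.symm h])]
        rw [ih rest acc (by simpa using Nat.le_of_succ_le_succ hf)]
        simp [h]

theorem count_dot (l : List Char) : PySem.Chars.count l ['.'] = l.count '.' := by
  unfold PySem.Chars.count
  rw [if_neg (by simp)]
  simpa using count_go_dot l.length l 0 (Nat.le_refl _)

theorem isIn_single (c : Char) (s : List Char) :
    PySem.Chars.isIn [c] s = s.contains c := by
  by_cases h : c ∈ s
  · rw [(PySem.Chars.isIn_iff_infix _ _).mpr ((List.singleton_infix_iff c s).mpr h)]
    simp [h]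
  · rw [(PySem.Chars.isIn_eq_false_iff _ _).mpr (by simpa [List.singleton_infix_iff] using h)]
    simp [h]

theorem isIn_scheme_false {s : List Char} (h : '/' ∉ s) :
    PySem.Chars.isIn [':', '/', '/'] s = false := by
  apply (PySem.Chars.isIn_eq_false_iff _ _).mpr
  intro hinf
  exact h (hinf.subset (by simp))

theorem strip_empty_iff (p : List Char) :
    (PySem.Str.strip (String.ofList p) == "") = blankPart p := by
  rw [Bool.eq_iff_iff, beq_iff_eq, ← String.toList_inj, PySem.Str.toList_strip,
    String.toList_ofList]
  have hnil : ("" : String).toList = [] := rfl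
  rw [hnil]
  unfold PySem.Chars.strip PySem.Chars.rstrip PySem.Chars.lstrip blankPart
  rw [List.reverse_eq_nil_iff, List.dropWhile_eq_nil_iff, List.all_eq_true]
  constructor
  · intro h c hc
    rw [← List.takeWhile_append_dropWhile (p := PySem.Chars.isspace) (l := p)] at hc
    rcases List.mem_append.mp hc with h1 | h2
    · exact List.mem_takeWhile_imp h1
    · exact h c (List.mem_reverse.mpr h2)
  · intro h c hc
    exact h c ((List.dropWhile_sublist _).subset (List.mem_reverse.mp hc))

theorem allNB_false_eq_all {ps : List (List Char)} (h : ps ≠ []) :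
    allNB false ps = ps.all (fun p => !blankPart p) := by
  induction ps with
  | nil => exact absurd rfl h
  | cons p ps ih =>
    cases ps with
    | nil => simp [allNB]
    | cons q qs =>
      have h2 : allNB false (p :: q :: qs) = ((false || !blankPart p) && allNB false (q :: qs)) := by
        simp [allNB]
      rw [h2, ih (by simp)]
      simp [List.all_cons]

theorem altLoop_slash {l : List Char} (h : '/' ∈ l ∨ '\\' ∈ l) (dots : Nat) (has ok : Bool) :
    altLoop l dots has ok = false := by
  induction l generalizing dots has ok with
  | nil => simp at h
  | cons c rest ih =>
    simp only [altLoop]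
    by_cases hc : c = '/' ∨ c = '\\'
    · rw [if_pos (by rcases hc with rfl | rfl <;> simp)]
    · have hc1 : ¬ c = '/' := fun h' => hc (Or.inl h')
      have hc2 : ¬ c = '\\' := fun h' => hc (Or.inr h')
      rw [if_neg (by simp [hc1, hc2])]
      have hrest : '/' ∈ rest ∨ '\\' ∈ rest := by
        rcases h with h | h
        · rcases List.mem_cons.mp h with rfl | h'
          · exact absurd rfl hc1
          · exact Or.inl h'
        · rcases List.mem_cons.mp h with rfl | h'
          · exact absurd rfl hc2
          · exact Or.inr h' 
      split_ifs <;> exact ih hrest _ _ _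

theorem altLoop_eq {l : List Char} (h : ¬ ('/' ∈ l ∨ '\\' ∈ l)) (dots : Nat) (has ok : Bool) :
    altLoop l dots has ok =
      (decide (dots + l.count '.' = 2) && ok && allNB has (splitDot l)) := by
  induction l generalizing dots has ok with
  | nil =>
    simp only [altLoop, splitDot, allNB, blankPart, List.count_nil, Nat.add_zero,
      List.isEmpty_nil, if_true, List.all_nil, Bool.not_true, Bool.or_false]
    by_cases hd2 : dots = 2 <;> simp [hd2]
  | cons c rest ih =>
    have hc1 : ¬ c = '/' := fun h' => h (Or.inl (h' ▸ List.mem_cons_self))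
    have hc2 : ¬ c = '\\' := fun h' => h (Or.inr (h' ▸ List.mem_cons_self))
    have hrest : ¬ ('/' ∈ rest ∨ '\\' ∈ rest) := fun h' => by
      rcases h' with h' | h'
      · exact h (Or.inl (List.mem_cons_of_mem _ h'))
      · exact h (Or.inr (List.mem_cons_of_mem _ h'))
    simp only [altLoop, if_neg (show ¬ (c = '/' || c = '\\') = true by simp [hc1, hc2])]
    by_cases hd : c = '.'
    · subst hd
      rw [if_pos rfl, ih hrest]
      have harith : dots + 1 + rest.count '.' = dots + (rest.count '.' + 1) := by omega
      cases hsd : splitDot rest with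
      | nil => exact absurd hsd (splitDot_ne_nil rest)
      | cons q qs =>
        have hsplit : splitDot ('.' :: rest) = [] :: q :: qs := by simp [splitDot, hsd]
        have hcount : List.count '.' ('.' :: rest) = rest.count '.' + 1 := by simp
        rw [hsplit, hcount, harith]
        have hA : allNB has ([] :: q :: qs) = (has && allNB false (q :: qs)) := by
          simp [allNB, blankPart]
        rw [hA]
        cases ok <;> cases has <;> simp
    · rw [if_neg hd]
      cases hsd : splitDot rest with
      | nil => exact absurd hsd (splitDot_ne_nil rest)
      | cons q qs =>
        have hcount : (c :: rest).count '.' = rest.count '.' := by simp [hd]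
        have hsplit : splitDot (c :: rest) = (c :: q) :: qs := by
          simp [splitDot, hd, hsd]
        by_cases hws : PySem.Chars.isspace c = true
        · rw [if_pos hws, ih hrest, hcount, hsplit, hsd]
          have hb : blankPart (c :: q) = blankPart q := by simp [blankPart, hws]
          simp [allNB, hb]
        · rw [if_neg hws, ih hrest, hcount, hsplit, hsd]
          have hcf : PySem.Chars.isspace c = false := eq_false_of_ne_true hws
          have hb : blankPart (c :: q) = false := by
            simp [blankPart, hcf]
          cases hqs : qs.isEmpty <;> simp [allNB, hb, hqs]

theorem all_map_ofList (ps : List (List Char)) (q : String → Bool) :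
    (ps.map String.ofList).all q = ps.all (fun p => q (String.ofList p)) := by
  simp [List.all_map, Function.comp_def]

theorem a_eq_specForm (path : String) :
    is_databricks_table_name_py path = specForm path.toList := by
  unfold is_databricks_table_name_py specForm
  have hdot : ("." : String).toList = ['.'] := rfl
  have htl : ("/" : String).toList = ['/'] := rfl
  have htb : ("\\" : String).toList = ['\\'] := rfl
  have hts : ("://" : String).toList = [':', '/', '/'] := rfl
  by_cases hs : '/' ∈ path.toList ∨ '\\' ∈ path.toList
  · rw [if_pos hs]
    rw [if_pos ?_]
    simp only [PySem.Str.isIn, htl, htb, isIn_single]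
    rcases hs with h | h <;> simp [h]
  · rw [if_neg hs]
    have hs1 : '/' ∉ path.toList := fun h => hs (Or.inl h)
    have hs2 : '\\' ∉ path.toList := fun h => hs (Or.inr h)
    rw [if_neg (by simp only [PySem.Str.isIn, htl, htb, isIn_single]; simp [hs1, hs2])]
    rw [if_neg (by simp only [PySem.Str.isIn, hts]; simp [isIn_scheme_false hs1])]
    simp only [PySem.Str.count, hdot, count_dot]
    simp only [PySem.Str.split?, PySem.Chars.split?, hdot, List.isEmpty_cons,
      Bool.false_eq_true, if_false, Option.map_some, Option.getD_some, splitOn_dot,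
      all_map_ofList, strip_empty_iff]
    by_cases hc : path.toList.count '.' = 2
    · simp [hc]
    · simp [hc]

theorem b_eq_specForm (path : String) :
    is_databricks_table_name_py_alt path = specForm path.toList := by
  unfold is_databricks_table_name_py_alt specForm
  by_cases hs : '/' ∈ path.toList ∨ '\\' ∈ path.toList
  · rw [if_pos hs, altLoop_slash hs]
  · rw [if_neg hs, altLoop_eq hs]
    rw [allNB_false_eq_all (splitDot_ne_nil _)]
    simp

-- ===== VERDICT (by name: the statement is the Claim_ definition above) =====
theorem is_databricks_table_name_py_spec : Claim_equal_is_databricks_table_name_py := by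
  intro path _
  unfold Spec_is_databricks_table_name_py
  rw [a_eq_specForm, b_eq_specForm]
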